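-- pv_equiv track=rewrite | github.com/pjcau/esp32-emu-turbo | scripts/verify_net_connectivity.py | _ref_bridges
-- ===== SOURCE A (Python) =====
-- INTERNAL_PAD_BRIDGES = {
--     # 4-pin tact switches (SW_PUSH_6mm family): pads 1-2 are one terminal,
--     # 3-4 the other; pressing shorts {1,2} to {3,4}. With no external copper
--     # between same-terminal pads, the switch body still bridges them.
--     # Applies to SW1..SW13, SW_RST, SW_BOOT. Does NOT apply to SW_PWR.
--     "SW":      [("1", "2"), ("3", "4")],
--     "SW_RST":  [("1", "2"), ("3", "4")],
--     "SW_BOOT": [("1", "2"), ("3", "4")],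
-- }
--
-- INTERNAL_BRIDGE_EXCLUDE = {"SW_PWR"}
--
-- def _ref_bridges(ref):
--     """Return the list of internally-bridged pad pairs for a given ref,
--     or [] if none. Uses prefix matching with explicit exclusions."""
--     if ref in INTERNAL_BRIDGE_EXCLUDE:
--         return []
--     # Longest-prefix match wins
--     best = None
--     best_len = -1
--     for prefix, bridges in INTERNAL_PAD_BRIDGES.items():
--         if ref.startswith(prefix) and len(prefix) > best_len:
--             best = bridges
--             best_len = len(prefix)
--     return best or []
-- ===== SOURCE B (Python) =====
-- INTERNAL_PAD_BRIDGES = {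
--     "SW":      [("1", "2"), ("3", "4")],
--     "SW_RST":  [("1", "2"), ("3", "4")],
--     "SW_BOOT": [("1", "2"), ("3", "4")],
-- }
--
-- INTERNAL_BRIDGE_EXCLUDE = {"SW_PWR"}
--
--
-- def _ref_bridges(ref):
--     """Return the list of internally-bridged pad pairs for a given ref,
--     or [] if none. Sort-then-first-match: longest candidate prefixes first."""
--     if ref in INTERNAL_BRIDGE_EXCLUDE:
--         return []
--     for prefix in sorted(INTERNAL_PAD_BRIDGES, key=len, reverse=True):
--         if ref.startswith(prefix):
--             return INTERNAL_PAD_BRIDGES[prefix]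
--     return []
-- ===== Notes on version B (the rewrite author's own statement) =====
-- stated objective: simpler
-- what changed: Replaces the best/best_len accumulator scan with sorting the candidate prefixes by length descending and returning the dict entry for the first prefix that matches.
import Mathlib
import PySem

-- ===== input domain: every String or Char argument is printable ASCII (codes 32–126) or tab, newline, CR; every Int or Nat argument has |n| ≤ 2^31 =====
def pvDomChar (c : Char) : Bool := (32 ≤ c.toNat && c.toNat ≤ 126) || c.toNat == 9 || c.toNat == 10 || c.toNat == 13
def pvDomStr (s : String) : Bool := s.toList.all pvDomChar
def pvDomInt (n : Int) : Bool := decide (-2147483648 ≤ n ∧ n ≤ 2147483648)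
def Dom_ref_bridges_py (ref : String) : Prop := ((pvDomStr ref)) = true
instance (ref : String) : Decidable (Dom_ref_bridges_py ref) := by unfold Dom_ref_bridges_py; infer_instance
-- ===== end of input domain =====

-- B replaces A's best/best_len longest-prefix scan with sorting the prefixes by length (descending) and returning the first match (simpler decomposition).

-- ===== PORT A =====
def pvBridgeVal : List (String × String) := [("1", "2"), ("3", "4")]

-- INTERNAL_PAD_BRIDGES as its insertion-ordered items list
def pvBridgeItems : List (String × List (String × String)) :=
  [("SW", pvBridgeVal), ("SW_RST", pvBridgeVal), ("SW_BOOT", pvBridgeVal)]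

-- the 'for prefix, bridges in INTERNAL_PAD_BRIDGES.items()' loop with state (best, best_len)
def refBridgesLoopA (ref : String) :
    List (String × List (String × String)) → Option (List (String × String)) → Int →
    Option (List (String × String))
  | [], best, _ => best
  | (pfx, bridges) :: rest, best, bestLen =>
    if PySem.Str.startswith ref pfx && decide (bestLen < (PySem.Str.len pfx : Int)) then
      refBridgesLoopA ref rest (some bridges) (PySem.Str.len pfx)
    else
      refBridgesLoopA ref rest best bestLen

def ref_bridges_py (ref : String) : List (String × String) :=
  if ref = "SW_PWR" then []  -- ref in INTERNAL_BRIDGE_EXCLUDE = {"SW_PWR"}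
  else
    -- 'best or []': None → []; a (possibly empty) list is returned as-is ([] or [] = [])
    (refBridgesLoopA ref pvBridgeItems none (-1)).getD []

-- ===== PORT B =====
def pvBridgeDict : PySem.Dict String (List (String × String)) :=
  PySem.Dict.ofList pvBridgeItems

-- the 'for prefix in sorted(...)' loop: first matching prefix wins
def refBridgesFindB (ref : String) : List String → List (String × String)
  | [] => []
  | p :: rest =>
    if PySem.Str.startswith ref p then
      -- INTERNAL_PAD_BRIDGES[prefix]: p is a key of the dict, lookup always succeeds
      (pvBridgeDict.get? p).getD []
    else
      refBridgesFindB ref rest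

def ref_bridges_py_alt (ref : String) : List (String × String) :=
  if ref = "SW_PWR" then []
  else
    refBridgesFindB ref
      (PySem.List.sorted ["SW", "SW_RST", "SW_BOOT"] (fun s => PySem.Str.len s) true)

-- ===== PRECONDITION & SPEC =====
def Spec_ref_bridges_py (ref : String) (out : List (String × String)) : Prop := out = ref_bridges_py_alt ref
instance (ref : String) (out : List (String × String)) : Decidable (Spec_ref_bridges_py ref out) := by unfold Spec_ref_bridges_py; infer_instance

-- ===== CLAIM (what is proved, stated in full; the proofs are below) =====
def Claim_equal_ref_bridges_py : Prop := ∀ (ref : String), Dom_ref_bridges_py ref → Spec_ref_bridges_py ref (ref_bridges_py ref)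

-- ===== LEMMAS AND PROOFS =====
theorem sortedKeys_eq :
    PySem.List.sorted ["SW", "SW_RST", "SW_BOOT"] (fun s => PySem.Str.len s) true
      = ["SW_BOOT", "SW_RST", "SW"] := by decide

-- ===== VERDICT (by name: the statement is the Claim_ definition above) =====
theorem ref_bridges_py_spec : Claim_equal_ref_bridges_py := by
  intro ref _
  unfold Spec_ref_bridges_py ref_bridges_py ref_bridges_py_alt
  rw [sortedKeys_eq]
  by_cases h0 : ref = "SW_PWR" <;>
  by_cases h1 : PySem.Chars.startswith ref.toList ['S','W'] = true <;>
  by_cases h2 : PySem.Chars.startswith ref.toList ['S','W','_','R','S','T'] = true <;>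
  by_cases h3 : PySem.Chars.startswith ref.toList ['S','W','_','B','O','O','T'] = true <;>
    simp [pvBridgeItems, refBridgesLoopA, refBridgesFindB, pvBridgeDict, pvBridgeVal,
      h0, h1, h2, h3, PySem.Dict.ofList, PySem.Dict.update, PySem.Dict.insert,
      PySem.Dict.get?, PySem.Dict.empty, PySem.Dict.contains]
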